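-- pv_equiv track=rewrite | github.com/randomprimate/game-playing-agent | array_handling.py | sweep_left
-- ===== SOURCE A (Python) =====
-- def sweep_left(arr):
--     left_available = []
--     for i, e in enumerate(arr):
--         if e == 0:
--             left_available.append(i)
--         elif e == 1:
--             left_available = []
--     return left_available
-- ===== SOURCE B (Python) =====
-- def sweep_left(arr):
--     # two-phase: locate index of the last 1, then gather zero-indices after it
--     last_one = -1
--     for i, e in enumerate(arr):
--         if e == 1:
--             last_one = i
--     return [i for i, e in enumerate(arr) if i > last_one and e == 0]
-- ===== Notes on version B (the rewrite author's own statement) =====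
-- stated objective: alternative
-- what changed: Replaced the single forward pass that appends zero-indices and clears the accumulator on each 1 by a two-phase shape: first find the index of the last 1 (default -1), then gather the zero-indices strictly after it with a comprehension.
import Mathlib
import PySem

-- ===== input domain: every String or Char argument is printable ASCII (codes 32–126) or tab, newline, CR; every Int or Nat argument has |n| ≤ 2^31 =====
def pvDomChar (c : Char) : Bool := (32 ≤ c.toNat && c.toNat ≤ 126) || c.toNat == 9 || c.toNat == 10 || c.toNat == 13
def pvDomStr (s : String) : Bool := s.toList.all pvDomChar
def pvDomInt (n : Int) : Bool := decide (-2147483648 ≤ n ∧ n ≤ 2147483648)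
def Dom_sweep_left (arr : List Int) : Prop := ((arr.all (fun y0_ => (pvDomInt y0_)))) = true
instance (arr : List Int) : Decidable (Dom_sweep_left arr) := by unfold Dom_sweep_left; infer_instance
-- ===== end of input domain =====

-- B differs from A only in decomposition (locate last 1, then gather); same value everywhere.
-- ===== PORT A =====
def sweep_left (arr : List Int) : List Int :=
  (PySem.List.enumerate arr).foldl
    (fun left_available p =>
      if p.2 = 0 then left_available ++ [p.1]
      else if p.2 = 1 then []
      else left_available) []

-- ===== PORT B =====
def sweep_left_alt (arr : List Int) : List Int :=
  let last_one : Int :=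
    (PySem.List.enumerate arr).foldl (fun acc p => if p.2 = 1 then p.1 else acc) (-1)
  ((PySem.List.enumerate arr).filter (fun p => decide (last_one < p.1) && decide (p.2 = 0))).map (·.1)

-- ===== PRECONDITION & SPEC =====
def Spec_sweep_left (arr : List Int) (out : List Int) : Prop := out = sweep_left_alt arr
instance (arr : List Int) (out : List Int) : Decidable (Spec_sweep_left arr out) := by unfold Spec_sweep_left; infer_instance

-- ===== CLAIM (what is proved, stated in full; the proofs are below) =====
def Claim_equal_sweep_left : Prop := ∀ (arr : List Int), Dom_sweep_left arr → Spec_sweep_left arr (sweep_left arr)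

-- ===== LEMMAS AND PROOFS =====

def pvLastOne (arr : List Int) : Int :=
  (PySem.List.enumerate arr).foldl (fun acc p => if p.2 = 1 then p.1 else acc) (-1)

lemma pvLastOne_append (xs : List Int) (x : Int) :
    pvLastOne (xs ++ [x]) = if x = 1 then (xs.length : Int) else pvLastOne xs := by
  simp [pvLastOne, PySem.List.enumerate_append, List.foldl_append]

lemma pvLastOne_lt (xs : List Int) : pvLastOne xs < (xs.length : Int) := by
  induction xs using List.reverseRecOn with
  | nil => simp [pvLastOne, PySem.List.enumerate]
  | append_singleton xs x ih =>
    rw [pvLastOne_append]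
    split
    · simp
    · simp only [List.length_append, List.length_cons, List.length_nil]
      push_cast
      omega

lemma sweep_left_alt_eq (arr : List Int) :
    sweep_left_alt arr =
      ((PySem.List.enumerate arr).filter
        (fun p => decide (pvLastOne arr < p.1) && decide (p.2 = 0))).map (·.1) := rfl

lemma fst_mem_enumerate_lt {p : Int × Int} {xs : List Int} (h : p ∈ PySem.List.enumerate xs) :
    p.1 < (xs.length : Int) := by
  rcases (PySem.List.mem_enumerate_iff xs 0 p).1 h with ⟨k, hk, rfl⟩
  simp; omega

lemma sweep_eq (arr : List Int) : sweep_left arr = sweep_left_alt arr := by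
  induction arr using List.reverseRecOn with
  | nil => rfl
  | append_singleton xs x ih =>
    rw [sweep_left_alt_eq, pvLastOne_append]
    rw [sweep_left, PySem.List.enumerate_append, List.foldl_append]
    by_cases h1 : x = 1
    · simp only [h1, if_true, PySem.List.enumerate, List.foldl,
        if_neg (by norm_num : ¬ ((1:Int) = 0))]
      rw [List.filter_append]
      rw [List.filter_eq_nil_iff.2 (fun p hp => by
        have := fst_mem_enumerate_lt hp
        simp; intro h; omega)]
      simp
    · by_cases h0 : x = 0
      · subst h0
        simp only [if_neg h1, PySem.List.enumerate, List.foldl, if_true]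
        rw [List.filter_append, List.map_append]
        have hlt : pvLastOne xs < (xs.length : Int) := pvLastOne_lt xs
        have hfil : List.filter (fun p => decide (pvLastOne xs < p.1) && decide (p.2 = (0:Int)))
            [((0:Int) + xs.length, (0:Int))] = [((0:Int) + xs.length, 0)] := by
          simp; omega
        rw [hfil]
        rw [sweep_left] at ih
        rw [ih, sweep_left_alt_eq]
        simp [pvLastOne]
      · simp only [if_neg h1, PySem.List.enumerate, List.foldl, if_neg h0]
        rw [List.filter_append, List.map_append]
        have hfil : List.filter (fun p => decide (pvLastOne xs < p.1) && decide (p.2 = (0:Int)))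
            [((0:Int) + xs.length, x)] = [] := by
          simp [h0]
        rw [hfil]
        rw [sweep_left] at ih
        rw [ih, sweep_left_alt_eq]
        simp [pvLastOne]

-- ===== VERDICT (by name: the statement is the Claim_ definition above) =====
theorem sweep_left_spec : Claim_equal_sweep_left := by
  intro arr _
  exact sweep_eq arr
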